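-- pv_equiv track=rewrite | github.com/ikirovbgn205/Python_fundamentals_random_trainnings | factorial_division.py | factorial_division
-- ===== SOURCE A (Python) =====
-- def factorial_division(number_one: int, number_two: int) -> int:
--     first_factorial = 1
--     second_factorial = 1
--     for num in range(1,number_one + 1):
--         first_factorial *= num
--
--     for num in range(1,number_two + 1):
--         second_factorial *= num
--
--     result = first_factorial // second_factorial
--     return result
-- ===== SOURCE B (Python) =====
-- def factorial_division(number_one: int, number_two: int) -> int:
--     a = number_one if number_one > 1 else 1
--     b = number_two if number_two > 1 else 1
--     if a < b:
--         return 0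
--     result = 1
--     for num in range(b + 1, a + 1):
--         result *= num
--     return result
-- ===== Notes on version B (the rewrite author's own statement) =====
-- stated objective: faster
-- what changed: Instead of computing both full factorials and dividing, B cancels the common factor: it multiplies only number_two+1..number_one (returning 0 when the clamped first argument is smaller), avoiding huge intermediate bigints.
import Mathlib
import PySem

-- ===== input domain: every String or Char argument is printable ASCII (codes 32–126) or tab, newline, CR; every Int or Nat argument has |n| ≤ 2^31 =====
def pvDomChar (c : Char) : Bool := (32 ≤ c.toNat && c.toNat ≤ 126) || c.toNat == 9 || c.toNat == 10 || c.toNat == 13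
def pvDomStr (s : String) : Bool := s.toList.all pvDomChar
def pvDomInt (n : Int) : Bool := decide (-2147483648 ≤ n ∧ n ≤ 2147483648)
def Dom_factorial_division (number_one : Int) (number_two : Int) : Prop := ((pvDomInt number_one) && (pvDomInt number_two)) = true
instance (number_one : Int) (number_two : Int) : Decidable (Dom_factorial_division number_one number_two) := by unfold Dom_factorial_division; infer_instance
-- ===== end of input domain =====

-- B cancels the common factor of the two factorials: it multiplies only number_two+1..number_one
-- (0 when the clamped first argument is smaller), instead of building both full factorials.

-- ===== PORT A =====
def factorial_division (number_one : Int) (number_two : Int) : Int :=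
  let first_factorial : Int := 1
  let second_factorial : Int := 1
  let first_factorial := (PySem.List.pyRange 1 (number_one + 1) 1).foldl (fun acc num => acc * num) first_factorial
  let second_factorial := (PySem.List.pyRange 1 (number_two + 1) 1).foldl (fun acc num => acc * num) second_factorial
  PySem.Int.floordiv first_factorial second_factorial

-- ===== PORT B =====
def factorial_division_alt (number_one : Int) (number_two : Int) : Int :=
  let a : Int := if number_one > 1 then number_one else 1
  let b : Int := if number_two > 1 then number_two else 1
  if a < b then 0
  else (PySem.List.pyRange (b + 1) (a + 1) 1).foldl (fun acc num => acc * num) 1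

-- ===== PRECONDITION & SPEC =====
def Spec_factorial_division (number_one : Int) (number_two : Int) (out : Int) : Prop := out = factorial_division_alt number_one number_two
instance (number_one : Int) (number_two : Int) (out : Int) : Decidable (Spec_factorial_division number_one number_two out) := by unfold Spec_factorial_division; infer_instance

-- ===== CLAIM (what is proved, stated in full; the proofs are below) =====
def Claim_equal_factorial_division : Prop := ∀ (number_one : Int) (number_two : Int), Dom_factorial_division number_one number_two → Spec_factorial_division number_one number_two (factorial_division number_one number_two)

-- ===== LEMMAS AND PROOFS =====

theorem pv_foldl_mul (l : List Int) (c : Int) :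
    l.foldl (fun acc num => acc * num) c = c * l.prod := by
  induction l generalizing c with
  | nil => simp
  | cons x xs ih => simp [List.foldl, ih, mul_assoc]

theorem pv_one_le_prod (l : List Int) (h : ∀ x ∈ l, 1 ≤ x) : 1 ≤ l.prod := by
  induction l with
  | nil => simp
  | cons x xs ih =>
    simp only [List.prod_cons]
    have hx : 1 ≤ x := h x (by simp)
    have hxs : 1 ≤ xs.prod := ih (fun y hy => h y (by simp [hy]))
    nlinarith

-- the factorial loop of A equals the product of range 1..max n 1
theorem pv_fact_eq (n : Int) :
    (PySem.List.pyRange 1 (n + 1) 1).foldl (fun acc num => acc * num) 1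
      = (PySem.List.pyRange 1 ((if n > 1 then n else 1) + 1) 1).prod := by
  rw [pv_foldl_mul, one_mul]
  by_cases h : n > 1
  · simp [h]
  · simp only [h, if_false]
    rcases le_or_gt n 0 with h0 | h0
    · rw [PySem.List.pyRange_one_eq_nil (by omega), PySem.List.pyRange_one_singleton]
      simp
    · have : n = 1 := by omega
      subst this; rfl

theorem pv_one_le_range_prod (a b : Int) (ha : 1 ≤ a) :
    1 ≤ (PySem.List.pyRange a b 1).prod := by
  apply pv_one_le_prod
  intro x hx
  rw [PySem.List.mem_pyRange_one] at hx
  omega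

theorem factorial_division_spec : Claim_equal_factorial_division := by
  unfold Claim_equal_factorial_division
  intro n1 n2 _
  unfold Spec_factorial_division factorial_division factorial_division_alt
  simp only []
  rw [pv_fact_eq n1, pv_fact_eq n2]
  set a : Int := if n1 > 1 then n1 else 1 with ha
  set b : Int := if n2 > 1 then n2 else 1 with hb
  have ha1 : 1 ≤ a := by rw [ha]; split <;> omega
  have hb1 : 1 ≤ b := by rw [hb]; split <;> omega
  have hSpos : 0 < (PySem.List.pyRange 1 (b + 1) 1).prod :=
    lt_of_lt_of_le one_pos (pv_one_le_range_prod 1 (b + 1) le_rfl)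
  by_cases hab : a < b
  · -- A: factorial(a) < factorial(b), so floor division gives 0; B returns 0
    simp only [hab, if_true]
    have hsplit := PySem.List.pyRange_one_append 1 (a + 1) (b + 1) (by omega) (by omega)
    rw [PySem.Int.floordiv_eq_ediv_of_pos hSpos]
    apply Int.ediv_eq_zero_of_lt
    · exact le_of_lt (lt_of_lt_of_le one_pos (pv_one_le_range_prod 1 (a + 1) le_rfl))
    · rw [hsplit, List.prod_append]
      have hA : 1 ≤ (PySem.List.pyRange 1 (a + 1) 1).prod := pv_one_le_range_prod 1 (a + 1) le_rfl
      -- the tail pyRange (a+1) (b+1) is nonempty with all elements ≥ 2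
      have hcons := PySem.List.pyRange_one_cons (a := a + 1) (b := b + 1) (by omega)
      rw [hcons, List.prod_cons]
      have htail : 1 ≤ (PySem.List.pyRange (a + 1 + 1) (b + 1) 1).prod :=
        pv_one_le_range_prod _ _ (by omega)
      have h2 : (1:Int) < (a + 1) * (PySem.List.pyRange (a + 1 + 1) (b + 1) 1).prod := by
        nlinarith
      calc (PySem.List.pyRange 1 (a + 1) 1).prod
          = (PySem.List.pyRange 1 (a + 1) 1).prod * 1 := (mul_one _).symm
        _ < (PySem.List.pyRange 1 (a + 1) 1).prod *
              ((a + 1) * (PySem.List.pyRange (a + 1 + 1) (b + 1) 1).prod) :=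
            mul_lt_mul_of_pos_left h2 (by linarith)
  · -- A: factorial(a) = factorial(b) * prod(b+1..a+1); floor division cancels
    simp only [hab, if_false]
    have hsplit := PySem.List.pyRange_one_append 1 (b + 1) (a + 1) (by omega) (by omega)
    rw [hsplit, List.prod_append, PySem.Int.floordiv_eq_ediv_of_pos hSpos,
        Int.mul_ediv_cancel_left _ (ne_of_gt hSpos), pv_foldl_mul, one_mul]
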